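-- pv_equiv track=rewrite | github.com/Muharfez/tetris-dqn | app/tetris.py | get_grid_height
-- ===== SOURCE A (Python) =====
-- from typing import Dict, List
--
-- def get_grid_height(grid : List):
--     height = 1000
--     for column in range(len(grid[0])):
--         current_height = 0
--         row  = 0
--         while row != len(grid)-1 and grid[row + 1][column] == (0,0,0) and current_height != height:
--             current_height +=1
--             row += 1
--         if current_height < height:
--                 height = current_height
--     return height
-- ===== SOURCE B (Python) =====
-- def get_grid_height(grid):
--     cols = len(grid[0])
--     if cols == 0:
--         return 1000
--     for r in range(1, len(grid)):
--         if any(cell != (0, 0, 0) for cell in grid[r][:cols]):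
--             return min(r - 1, 1000)
--     return min(len(grid) - 1, 1000)
-- ===== Notes on version B (the rewrite author's own statement) =====
-- stated objective: alternative
-- what changed: Replaces A's per-column while-loop scan (one counter per column, min over columns, capped by the running minimum) with a single row-major scan that returns at the first row containing a non-empty cell.
-- outside the precondition, e.g. on get_grid_height([[(0, 0, 0)], [(1, 1, 1)], []]): A returns 0, B returns 0
import Mathlib
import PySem

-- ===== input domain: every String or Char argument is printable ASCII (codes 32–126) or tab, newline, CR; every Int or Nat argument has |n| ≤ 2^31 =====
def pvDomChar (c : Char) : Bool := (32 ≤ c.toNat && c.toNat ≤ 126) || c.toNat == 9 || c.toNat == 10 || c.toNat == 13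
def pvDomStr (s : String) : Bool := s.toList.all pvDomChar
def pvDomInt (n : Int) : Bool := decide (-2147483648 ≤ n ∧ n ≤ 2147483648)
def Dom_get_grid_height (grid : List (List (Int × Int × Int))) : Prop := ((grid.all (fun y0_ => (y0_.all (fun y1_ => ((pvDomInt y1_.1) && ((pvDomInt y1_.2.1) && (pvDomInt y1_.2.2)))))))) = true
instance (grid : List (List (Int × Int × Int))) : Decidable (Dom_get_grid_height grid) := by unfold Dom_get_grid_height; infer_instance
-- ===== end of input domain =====

-- B replaces A's per-column while-loop minimum with a single row-major scan that
-- returns at the first row containing a non-empty cell (same return value; no mutation).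

-- ===== PORT A =====
-- the inner while loop of A: state (current_height, row); fuel bounds the iteration count
-- (fuel = grid.length always suffices since row increases each step and stays < len(grid)-1)
def pvAgo (grid : List (List (Int × Int × Int))) (column : Int) (height : Int) :
    Nat → Int → Int → Int
  | 0, current, _ => current
  | fuel + 1, current, row =>
    if row ≠ (grid.length : Int) - 1 ∧
       (PySem.List.pyGet? ((PySem.List.pyGet? grid (row + 1)).getD []) column).getD (1, 1, 1)
         = ((0 : Int), (0 : Int), (0 : Int)) ∧
       current ≠ height
    then pvAgo grid column height fuel (current + 1) (row + 1)
    else current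

def get_grid_height (grid : List (List (Int × Int × Int))) : Int :=
  (PySem.List.pyRange 0 ((((PySem.List.pyGet? grid 0).getD []).length : Int)) 1).foldl
    (fun height column =>
      let current_height := pvAgo grid column height grid.length 0 0
      if current_height < height then current_height else height) 1000

-- ===== PORT B =====
-- the for-loop of B over rows 1..len(grid)-1, carried as recursion over the remaining rows
-- together with the row counter r (so at the end r = len(grid) and len(grid)-1 = r-1)
def pvBgo (cols : Nat) : List (List (Int × Int × Int)) → Int → Int
  | [], r => min (r - 1) 1000
  | row :: rest, r =>
    if (PySem.List.slice row (some 0) (some (cols : Int))).any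
        (fun cell => decide (cell ≠ ((0 : Int), (0 : Int), (0 : Int))))
    then min (r - 1) 1000
    else pvBgo cols rest (r + 1)

def get_grid_height_alt (grid : List (List (Int × Int × Int))) : Int :=
  let cols := ((PySem.List.pyGet? grid 0).getD []).length
  if cols = 0 then 1000
  else pvBgo cols (grid.drop 1) 1

-- ===== PRECONDITION & SPEC =====
-- Pre_ excludes the empty grid, on which both A and B raise IndexError at grid[0], and
-- ragged grids with a row shorter than row 0, on which whether A raises (and where) is an
-- accident of its column-major early-exit scan order.
def Pre_get_grid_height (grid : List (List (Int × Int × Int))) : Prop :=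
  grid ≠ [] ∧ ∀ row ∈ grid.drop 1, (grid.headD []).length ≤ row.length
instance (grid : List (List (Int × Int × Int))) : Decidable (Pre_get_grid_height grid) := by
  unfold Pre_get_grid_height; infer_instance

def pvWitness_get_grid_height : (List (List (Int × Int × Int))) :=
  [[(0, 0, 0)], [(1, 1, 1)]]

def Spec_get_grid_height (grid : List (List (Int × Int × Int))) (out : Int) : Prop := out = get_grid_height_alt grid
instance (grid : List (List (Int × Int × Int))) (out : Int) : Decidable (Spec_get_grid_height grid out) := by unfold Spec_get_grid_height; infer_instance

-- ===== CLAIM (what is proved, stated in full; the proofs are below) =====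
def Claim_equal_get_grid_height : Prop := ∀ (grid : List (List (Int × Int × Int))), Dom_get_grid_height grid → Pre_get_grid_height grid → Spec_get_grid_height grid (get_grid_height grid)

-- ===== LEMMAS AND PROOFS =====

-- abbreviations used only by the proofs
def pvCell (row : List (Int × Int × Int)) (c : Int) : Int × Int × Int :=
  (PySem.List.pyGet? row c).getD (1, 1, 1)

def pvZ (c : Int) (row : List (Int × Int × Int)) : Bool :=
  decide (pvCell row c = ((0 : Int), (0 : Int), (0 : Int)))

def pvAllE (cols : Nat) (row : List (Int × Int × Int)) : Bool :=
  !((PySem.List.slice row (some 0) (some (cols : Int))).any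
      (fun cell => decide (cell ≠ ((0 : Int), (0 : Int), (0 : Int)))))

-- generic takeWhile facts
theorem pv_tw_le_len {α : Type} (p : α → Bool) (L : List α) :
    (L.takeWhile p).length ≤ L.length :=
  (List.takeWhile_prefix p).length_le

theorem pv_tw_fail {α : Type} (p : α → Bool) :
    ∀ (L : List α) (h : (L.takeWhile p).length < L.length),
      p (L[(L.takeWhile p).length]'h) = false := by
  intro L
  induction L with
  | nil => intro h; simp at h
  | cons a L ih =>
    intro h
    by_cases ha : p a = true
    · have h' : (L.takeWhile p).length < L.length := by
        simp [ha] at h; omega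
      have key := ih h'
      simp only [List.takeWhile_cons_of_pos ha, List.length_cons, List.getElem_cons_succ]
      exact key
    · have ha' : p a = false := by simpa using ha
      simp [ha']

theorem pv_tw_le {α : Type} (p : α → Bool) :
    ∀ (L : List α) (k : Nat) (hk : k < L.length), p (L[k]) = false →
      (L.takeWhile p).length ≤ k := by
  intro L
  induction L with
  | nil => intro k hk; simp at hk
  | cons a L ih =>
    intro k hk hf
    by_cases ha : p a = true
    · cases k with
      | zero => simp at hf; simp [hf] at ha
      | succ k =>
        have := ih k (by simp at hk; omega) (by simpa using hf)
        simp [List.takeWhile_cons, ha]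
        omega
    · have ha' : p a = false := by simpa using ha
      simp [List.takeWhile_cons, ha']

theorem pv_tw_mono {α : Type} (p q : α → Bool) :
    ∀ (L : List α), (∀ x ∈ L, p x = true → q x = true) →
      (L.takeWhile p).length ≤ (L.takeWhile q).length := by
  intro L
  induction L with
  | nil => intro _; simp
  | cons a L ih =>
    intro h
    by_cases ha : p a = true
    · have hq : q a = true := h a (by simp) ha
      have := ih (fun x hx => h x (by simp [hx]))
      simp [List.takeWhile_cons, ha, hq]
      omega
    · have ha' : p a = false := by simpa using ha
      simp [List.takeWhile_cons, ha']

-- fold-with-min facts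
theorem pv_foldl_min_le_init (f : Int → Int) :
    ∀ (cs : List Int) (a : Int), List.foldl (fun h c => min h (f c)) a cs ≤ a := by
  intro cs
  induction cs with
  | nil => intro a; simp
  | cons c cs ih =>
    intro a
    calc List.foldl (fun h c => min h (f c)) (min a (f c)) cs ≤ min a (f c) := ih _
    _ ≤ a := min_le_left _ _

theorem pv_foldl_min_le_mem (f : Int → Int) :
    ∀ (cs : List Int) (a : Int) (c : Int), c ∈ cs →
      List.foldl (fun h c => min h (f c)) a cs ≤ f c := by
  intro cs
  induction cs with
  | nil => intro a c hc; simp at hc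
  | cons c0 cs ih =>
    intro a c hc
    rcases List.mem_cons.mp hc with h | h
    · subst h
      calc List.foldl (fun h c => min h (f c)) (min a (f c)) cs ≤ min a (f c) :=
            pv_foldl_min_le_init f cs _
      _ ≤ f c := min_le_right _ _
    · exact ih _ c h

theorem pv_le_foldl_min (f : Int → Int) :
    ∀ (cs : List Int) (a v : Int), v ≤ a → (∀ c ∈ cs, v ≤ f c) →
      v ≤ List.foldl (fun h c => min h (f c)) a cs := by
  intro cs
  induction cs with
  | nil => intro a v hv _; simpa using hv
  | cons c cs ih =>
    intro a v hv h
    exact ih _ v (le_min hv (h c (by simp))) (fun c' hc' => h c' (by simp [hc']))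

-- characterization of A's inner while loop
theorem pvAgo_eq (grid : List (List (Int × Int × Int))) (c : Int) (h : Int)
    (hg : grid ≠ []) :
    ∀ (fuel : Nat) (j : Nat), (j : Int) ≤ h → j + 1 ≤ grid.length →
      grid.length ≤ fuel + j →
      pvAgo grid c h fuel (j : Int) (j : Int)
        = min ((j : Int) + (((grid.drop (j + 1)).takeWhile (pvZ c)).length : Int)) h := by
  intro fuel
  induction fuel with
  | zero =>
    intro j hj hj1 hfuel
    omega
  | succ fuel ih =>
    intro j hj hj1 hfuel
    by_cases hend : j + 1 = grid.length
    · -- row = len(grid)-1 : loop stops, drop (j+1) = []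
      have hdrop : grid.drop (j + 1) = [] := by
        apply List.drop_eq_nil_of_le; omega
      have hcond : ((j : Int) ≠ (grid.length : Int) - 1) = False := by
        simp; omega
      simp only [pvAgo, hdrop, List.takeWhile_nil, List.length_nil]
      rw [if_neg]
      · rw [min_eq_left (by omega)]
        simp
      · intro hc; have := hc.1; omega
    · have hlt : j + 1 < grid.length := by omega
      have hacc : (PySem.List.pyGet? grid ((j : Int) + 1)).getD []
          = grid[j + 1]'hlt := by
        have : ((j : Int) + 1) = ((j + 1 : Nat) : Int) := by push_cast; ring
        rw [this, PySem.List.pyGet?_natCast]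
        simp [List.getElem?_eq_getElem hlt]
      have hdrop : grid.drop (j + 1) = grid[j + 1]'hlt :: grid.drop (j + 2) :=
        List.drop_eq_getElem_cons hlt
      by_cases hcell : pvCell (grid[j + 1]'hlt) c = ((0 : Int), (0 : Int), (0 : Int))
      · by_cases hjh : (j : Int) = h
        · -- current = height : loop stops
          simp only [pvAgo]
          rw [if_neg (by intro hc; exact hc.2.2 hjh)]
          rw [min_eq_right (by omega)]
          exact hjh
        · -- loop continues
          have step : pvAgo grid c h (fuel + 1) (j : Int) (j : Int)
              = pvAgo grid c h fuel ((j : Int) + 1) ((j : Int) + 1) := by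
            simp only [pvAgo]
            rw [if_pos]
            refine ⟨by omega, ?_, hjh⟩
            rw [hacc]; exact hcell
          have hcast : ((j : Int) + 1) = ((j + 1 : Nat) : Int) := by push_cast; ring
          rw [step, hcast, ih (j + 1) (by omega) (by omega) (by omega)]
          rw [hdrop, List.takeWhile_cons, if_pos (by simpa [pvZ] using hcell)]
          congr 1
          simp only [List.length_cons]
          push_cast
          ring
      · -- non-empty cell : loop stops, takeWhile prefix empty
        simp only [pvAgo]
        rw [if_neg (by intro hc; exact hcell (by rw [← hacc]; exact hc.2.1))]
        rw [hdrop, List.takeWhile_cons, if_neg (by simpa [pvZ] using hcell)]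
        simp
        omega

-- bridge between B's row test and A's per-column cells (rows long enough)
theorem pv_allE_cell {cols : Nat} {row : List (Int × Int × Int)} (hlen : cols ≤ row.length)
    (hE : pvAllE cols row = true) (c : Nat) (hc : c < cols) :
    pvCell row (c : Int) = ((0 : Int), (0 : Int), (0 : Int)) := by
  have hslice : PySem.List.slice row (some 0) (some (cols : Int)) = row.take cols := by
    rw [PySem.List.slice_zero_start, PySem.List.slice_to_natCast]
  have h1 : (row.take cols).any
      (fun cell => decide (cell ≠ ((0 : Int), (0 : Int), (0 : Int)))) = false := by
    have := hE
    simp only [pvAllE, Bool.not_eq_true'] at this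
    rwa [hslice] at this
  have hmem : row[c]'(by omega) ∈ row.take cols := by
    have hgt : (row.take cols)[c]'(by simp; omega) = row[c]'(by omega) := List.getElem_take
    rw [← hgt]
    exact List.getElem_mem _
  have h2 := List.any_eq_false.mp h1 _ hmem
  have h3 : row[c]'(by omega) = ((0 : Int), (0 : Int), (0 : Int)) := by
    simpa using h2
  simp only [pvCell]
  rw [PySem.List.pyGet?_natCast]
  simp [List.getElem?_eq_getElem (show c < row.length by omega)]
  exact h3

theorem pv_not_allE_cell {cols : Nat} {row : List (Int × Int × Int)} (hlen : cols ≤ row.length)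
    (hE : pvAllE cols row = false) :
    ∃ c : Nat, c < cols ∧ pvCell row (c : Int) ≠ ((0 : Int), (0 : Int), (0 : Int)) := by
  have hslice : PySem.List.slice row (some 0) (some (cols : Int)) = row.take cols := by
    rw [PySem.List.slice_zero_start, PySem.List.slice_to_natCast]
  have h1 : (row.take cols).any
      (fun cell => decide (cell ≠ ((0 : Int), (0 : Int), (0 : Int)))) = true := by
    have := hE
    simp only [pvAllE, Bool.not_eq_false'] at this
    rwa [hslice] at this
  obtain ⟨x, hx, hdec⟩ := List.any_eq_true.mp h1
  have hne : x ≠ ((0 : Int), (0 : Int), (0 : Int)) := of_decide_eq_true hdec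
  obtain ⟨i, hi, hxi⟩ := List.mem_iff_getElem.mp hx
  have hi' : i < cols := by
    simp [List.length_take] at hi; omega
  refine ⟨i, hi', ?_⟩
  have hrow : row[i]'(by omega) = x := by
    rw [← hxi]; exact (List.getElem_take).symm
  simp only [pvCell]
  rw [PySem.List.pyGet?_natCast]
  simp [List.getElem?_eq_getElem (show i < row.length by omega)]
  rw [hrow]
  exact hne

-- characterization of B's loop
theorem pvBgo_eq (cols : Nat) :
    ∀ (rest : List (List (Int × Int × Int))) (r : Int),
      pvBgo cols rest r = min (r - 1 + ((rest.takeWhile (pvAllE cols)).length : Int)) 1000 := by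
  intro rest
  induction rest with
  | nil => intro r; simp [pvBgo]
  | cons row rest ih =>
    intro r
    by_cases hE : pvAllE cols row = true
    · have hany : (PySem.List.slice row (some 0) (some (cols : Int))).any
          (fun cell => decide (cell ≠ ((0 : Int), (0 : Int), (0 : Int)))) = false := by
        have := hE
        simp only [pvAllE, Bool.not_eq_true'] at this
        exact this
      simp only [pvBgo, hany]
      rw [if_neg (by simp)]
      rw [ih (r + 1), List.takeWhile_cons, if_pos hE]
      simp only [List.length_cons]
      congr 1
      push_cast
      ring
    · have hE' : pvAllE cols row = false := by simpa using hE
      have hany : (PySem.List.slice row (some 0) (some (cols : Int))).any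
          (fun cell => decide (cell ≠ ((0 : Int), (0 : Int), (0 : Int)))) = true := by
        have := hE'
        simp only [pvAllE, Bool.not_eq_false'] at this
        exact this
      simp only [pvBgo, hany]
      rw [if_pos trivial]
      rw [List.takeWhile_cons, if_neg (by simp [hE'])]
      simp

-- A's fold rewritten with the per-column counts
theorem pv_foldA_eq (grid : List (List (Int × Int × Int))) (hg : grid ≠ []) :
    ∀ (cs : List Int) (a : Int), 0 ≤ a →
      List.foldl (fun height column =>
          let current_height := pvAgo grid column height grid.length 0 0
          if current_height < height then current_height else height) a cs
        = List.foldl (fun h c => min h ((((grid.drop 1).takeWhile (pvZ c)).length : Int))) a cs := by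
  intro cs
  induction cs with
  | nil => intro a _; rfl
  | cons c cs ih =>
    intro a ha
    have hago : pvAgo grid c a grid.length (0 : Int) (0 : Int)
        = min ((((grid.drop 1).takeWhile (pvZ c)).length : Int)) a := by
      have hlen : 1 ≤ grid.length := List.length_pos_iff.mpr hg
      have := pvAgo_eq grid c a hg grid.length 0 (by simpa using ha) (by omega) (by omega)
      simpa using this
    simp only [List.foldl_cons]
    have hstep : (let current_height := pvAgo grid c a grid.length 0 0
        if current_height < a then current_height else a)
        = min a ((((grid.drop 1).takeWhile (pvZ c)).length : Int)) := by
      simp only [hago]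
      rcases le_total ((((grid.drop 1).takeWhile (pvZ c)).length : Int)) a with hle | hle
      · rw [min_eq_left hle, min_eq_right hle]
        split <;> omega
      · rw [min_eq_right hle, min_eq_left hle]
        split <;> omega
    rw [hstep, ih (min a _) (le_min ha (by positivity))]

-- ===== VERDICT (by name: the statement is the Claim_ definition above) =====
theorem get_grid_height_spec : Claim_equal_get_grid_height := by
  intro grid _ hpre
  obtain ⟨hne, hlen⟩ := hpre
  obtain ⟨g0, rest, rfl⟩ := List.exists_cons_of_ne_nil hne
  unfold Spec_get_grid_height
  set cols := g0.length with hcols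
  have hhead : ((PySem.List.pyGet? (g0 :: rest) 0).getD []) = g0 := by
    simp [PySem.List.pyGet?_zero_cons]
  have hlen' : ∀ row ∈ rest, cols ≤ row.length := by
    intro row hr
    simpa using hlen row (by simpa using hr)
  by_cases h0 : cols = 0
  · -- no columns: A folds over the empty range, B returns 1000 directly
    unfold get_grid_height get_grid_height_alt
    rw [hhead]
    rw [← hcols, h0]
    simp [PySem.List.pyRange_one_eq_nil]
  · -- cols ≥ 1
    have hApc := pv_foldA_eq (g0 :: rest) (by simp)
      (PySem.List.pyRange 0 ((cols : Int)) 1) 1000 (by norm_num)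
    have hdrop1 : (g0 :: rest).drop 1 = rest := rfl
    set K : Nat := (rest.takeWhile (pvAllE cols)).length with hK
    have hKle : K ≤ rest.length := pv_tw_le_len _ _
    -- A = fold of min over per-column counts
    have hA : get_grid_height (g0 :: rest)
        = List.foldl (fun h c => min h (((rest.takeWhile (pvZ c)).length : Int))) 1000
            (PySem.List.pyRange 0 ((cols : Int)) 1) := by
      unfold get_grid_height
      rw [hhead, ← hcols]
      rw [hApc]
      simp [hdrop1]
    -- B = min K 1000
    have hB : get_grid_height_alt (g0 :: rest) = min (K : Int) 1000 := by
      unfold get_grid_height_alt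
      rw [hhead, ← hcols]
      rw [if_neg h0]
      rw [hdrop1, pvBgo_eq cols rest 1, ← hK]
      congr 1
      ring
    rw [hA, hB]
    -- lower bound facts: K ≤ pc c for every admissible column c
    have hKlepc : ∀ c : Int, c ∈ PySem.List.pyRange 0 ((cols : Int)) 1 →
        (K : Int) ≤ ((rest.takeWhile (pvZ c)).length : Int) := by
      intro c hc
      rw [PySem.List.mem_pyRange_one] at hc
      have hcn : ∃ cn : Nat, (cn : Int) = c ∧ cn < cols := by
        refine ⟨c.toNat, ?_, ?_⟩ <;> omega
      obtain ⟨cn, rfl, hcnlt⟩ := hcn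
      have := pv_tw_mono (pvAllE cols) (pvZ (cn : Int)) rest ?_
      · exact_mod_cast this
      · intro row hrow hE
        simp only [pvZ, decide_eq_true_eq]
        exact pv_allE_cell (hlen' row hrow) hE cn hcnlt
    -- witness column c0 with pc c0 = K
    have hwit : ∃ c0 : Nat, c0 < cols ∧ (rest.takeWhile (pvZ (c0 : Int))).length = K := by
      by_cases hKfull : K = rest.length
      · refine ⟨0, by omega, ?_⟩
        rw [Nat.cast_zero]
        have h1 : (rest.takeWhile (pvZ (0 : Int))).length ≤ rest.length := pv_tw_le_len _ _
        have h2 : (K : Int) ≤ ((rest.takeWhile (pvZ (0 : Int))).length : Int) := by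
          apply hKlepc
          rw [PySem.List.mem_pyRange_one]
          constructor <;> omega
        omega
      · have hKlt : K < rest.length := by omega
        have hfail : pvAllE cols (rest[K]'hKlt) = false := pv_tw_fail (pvAllE cols) rest hKlt
        obtain ⟨c0, hc0, hnz⟩ := pv_not_allE_cell (hlen' _ (List.getElem_mem hKlt)) hfail
        refine ⟨c0, hc0, ?_⟩
        have hub : (rest.takeWhile (pvZ (c0 : Int))).length ≤ K := by
          apply pv_tw_le _ rest K hKlt
          simp only [pvZ, decide_eq_false_iff_not]
          exact hnz
        have hlb : (K : Int) ≤ ((rest.takeWhile (pvZ (c0 : Int))).length : Int) := by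
          apply hKlepc
          rw [PySem.List.mem_pyRange_one]
          constructor <;> omega
        omega
    obtain ⟨c0, hc0lt, hc0K⟩ := hwit
    have hc0mem : (c0 : Int) ∈ PySem.List.pyRange 0 ((cols : Int)) 1 := by
      rw [PySem.List.mem_pyRange_one]; constructor <;> omega
    apply le_antisymm
    · -- fold ≤ min K 1000
      apply le_min
      · calc List.foldl _ 1000 _ ≤ ((rest.takeWhile (pvZ (c0 : Int))).length : Int) :=
              pv_foldl_min_le_mem _ _ 1000 _ hc0mem
        _ = (K : Int) := by exact_mod_cast congrArg Nat.cast hc0K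
      · exact pv_foldl_min_le_init _ _ 1000
    · -- min K 1000 ≤ fold
      apply pv_le_foldl_min _ _ 1000 (min (K : Int) 1000) (min_le_right _ _)
      intro c hc
      exact le_trans (min_le_left _ _) (hKlepc c hc)
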